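-- pv_equiv track=rewrite | github.com/emt0147t/codeptit2 | tools/auto_testcases.py | _interleave_sort
-- ===== SOURCE A (Python) =====
-- def _interleave_sort(arr):
--     s = sorted(arr)
--     result = []
--     l, r = 0, len(s)-1
--     toggle = True
--     while l <= r:
--         if toggle:
--             result.append(s[r]); r -= 1
--         else:
--             result.append(s[l]); l += 1
--         toggle = not toggle
--     return ' '.join(map(str, result))
-- ===== SOURCE B (Python) =====
-- def _interleave_sort(arr):
--     s = sorted(arr)
--     half = len(s) // 2
--     lo = s[:half]
--     hi = s[half:][::-1]
--     out = []
--     for h, l in zip(hi, lo):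
--         out += [h, l]
--     if len(hi) > half:
--         out.append(hi[-1])
--     return ' '.join(map(str, out))
-- ===== Notes on version B (the rewrite author's own statement) =====
-- stated objective: simpler
-- what changed: Replaces the two-pointer while loop with a toggle by slicing the sorted list into a descending upper half and ascending lower half and zipping them pairwise.
import Mathlib
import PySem

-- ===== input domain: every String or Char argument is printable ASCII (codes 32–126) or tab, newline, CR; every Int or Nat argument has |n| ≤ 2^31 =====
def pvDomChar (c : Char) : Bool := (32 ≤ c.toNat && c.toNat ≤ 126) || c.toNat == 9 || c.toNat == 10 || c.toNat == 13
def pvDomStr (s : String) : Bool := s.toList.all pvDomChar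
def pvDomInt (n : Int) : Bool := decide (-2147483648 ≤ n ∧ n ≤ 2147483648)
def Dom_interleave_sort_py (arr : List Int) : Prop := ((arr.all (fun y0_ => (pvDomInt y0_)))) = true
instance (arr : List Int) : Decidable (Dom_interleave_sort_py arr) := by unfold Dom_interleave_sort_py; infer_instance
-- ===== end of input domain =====

-- B replaces A's two-pointer-with-toggle while loop by slicing the sorted list into a
-- descending upper half and an ascending lower half, zipped pairwise (objective: simpler).

-- ===== PORT A =====
-- the while loop of A: state (l, r, toggle); s[r]/s[l] are always in range when l ≤ r, ported with pyGetD
def pvALoop (s : List Int) (l r : Int) (toggle : Bool) : List Int :=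
  if l ≤ r then
    if toggle then
      PySem.List.pyGetD s r 0 :: pvALoop s l (r - 1) false
    else
      PySem.List.pyGetD s l 0 :: pvALoop s (l + 1) r true
  else []
termination_by (r + 1 - l).toNat
decreasing_by all_goals omega

def interleave_sort_py (arr : List Int) : String :=
  let s := PySem.List.sorted arr (fun x => x) false
  let result := pvALoop s 0 (PySem.List.len s - 1) true
  PySem.Str.join " " (result.map PySem.Int.toStr)

-- ===== PORT B =====
def interleave_sort_py_alt (arr : List Int) : String :=
  let s := PySem.List.sorted arr (fun x => x) false
  let half := PySem.Int.floordiv (PySem.List.len s) 2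
  let lo := PySem.List.slice s none (some half)
  let hi := (PySem.List.slice? (PySem.List.slice s (some half) none) none none (-1)).getD []
  let out := (hi.zip lo).foldl (fun acc p => acc ++ [p.1, p.2]) []
  let out := if PySem.List.len hi > half then out ++ [PySem.List.pyGetD hi (-1) 0] else out
  PySem.Str.join " " (out.map PySem.Int.toStr)

-- ===== PRECONDITION & SPEC =====
def Spec_interleave_sort_py (arr : List Int) (out : String) : Prop := out = interleave_sort_py_alt arr
instance (arr : List Int) (out : String) : Decidable (Spec_interleave_sort_py arr out) := by unfold Spec_interleave_sort_py; infer_instance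

-- ===== CLAIM (what is proved, stated in full; the proofs are below) =====
def Claim_equal_interleave_sort_py : Prop := ∀ (arr : List Int), Dom_interleave_sort_py arr → Spec_interleave_sort_py arr (interleave_sort_py arr)

-- ===== LEMMAS AND PROOFS =====

-- structural mirror of A's loop on the segment s[l..r] it still has to visit
mutual
def pvFT : List Int → List Int
  | [] => []
  | a :: rest => ((a :: rest).getLast?.getD 0) :: pvFF ((a :: rest).dropLast)
  termination_by t => t.length
def pvFF : List Int → List Int
  | [] => []
  | a :: rest => a :: pvFT rest
  termination_by t => t.length
end

-- full interleaving of the two halves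
def pvIlv : List Int → List Int → List Int
  | [], _ => []
  | h :: hs, [] => h :: pvIlv hs []
  | h :: hs, l :: ls => h :: l :: pvIlv hs ls

lemma pvFT_ne_nil (t : List Int) (h : t ≠ []) :
    pvFT t = (t.getLast?.getD 0) :: pvFF t.dropLast := by
  cases t with
  | nil => exact absurd rfl h
  | cons a rest => simp [pvFT]

lemma pvALoop_eq (k : Nat) : ∀ (s : List Int) (l r : Int) (tg : Bool),
    0 ≤ l → r < s.length → (r + 1 - l).toNat = k →
    pvALoop s l r tg = (if tg then pvFT else pvFF) ((s.drop l.toNat).take k) := by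
  induction k with
  | zero =>
    intro s l r tg hl hr hk
    have hlr : ¬ l ≤ r := by omega
    rw [pvALoop]
    simp [hlr]
    cases tg <;> simp [pvFT, pvFF]
  | succ k ih =>
    intro s l r tg hl hr hk
    have hlr : l ≤ r := by omega
    set x := s.drop l.toNat with hx
    have hxlen : x.length = s.length - l.toNat := by simp [hx]
    have hklen : k + 1 ≤ x.length := by omega
    have hseglen : (x.take (k+1)).length = k + 1 := by
      simp [List.length_take]; omega
    have hxk : x[k]? = some (s[r.toNat]'(by omega)) := by
      have : x[k]? = s[l.toNat + k]? := by
        simp [hx, List.getElem?_drop]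
      rw [this, show l.toNat + k = r.toNat by omega]
      exact List.getElem?_eq_getElem (by omega)
    cases tg with
    | true =>
      rw [pvALoop, if_pos hlr, if_pos rfl]
      have hIH := ih s l (r - 1) false hl (by omega) (by omega)
      rw [if_neg Bool.false_ne_true] at hIH
      rw [hIH, if_pos rfl]
      rw [pvFT_ne_nil _ (by intro hc; rw [hc] at hseglen; simp at hseglen)]
      have hhead : (x.take (k+1)).getLast?.getD 0 = PySem.List.pyGetD s r 0 := by
        rw [List.getLast?_eq_getElem?, hseglen, Nat.add_sub_cancel,
          List.getElem?_take_of_lt (by omega), hxk,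
          PySem.List.pyGetD_eq_getElem s 0 (by omega) (by exact_mod_cast hr)]
        rfl
      have htail : (x.take (k+1)).dropLast = x.take k := by
        rw [List.dropLast_eq_take, hseglen, Nat.add_sub_cancel, List.take_take]
        simp
      rw [hhead, htail]
    | false =>
      rw [pvALoop, if_pos hlr, if_neg Bool.false_ne_true, if_neg Bool.false_ne_true]
      have hIH := ih s (l + 1) r true (by omega) hr (by omega)
      rw [if_pos rfl] at hIH
      rw [hIH]
      have hx0 : x[0]? = some (s[l.toNat]'(by omega)) := by
        simp [hx, List.getElem?_drop]
      obtain ⟨a, rest, hsg⟩ : ∃ a rest, x.take (k+1) = a :: rest := by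
        cases hc : x.take (k+1) with
        | nil => rw [hc] at hseglen; simp at hseglen
        | cons a rest => exact ⟨a, rest, rfl⟩
      rw [hsg, pvFF]
      congr 1
      · -- a = s[l]
        have ha : (x.take (k+1))[0]? = some a := by rw [hsg]; rfl
        rw [List.getElem?_take_of_lt (by omega), hx0] at ha
        rw [PySem.List.pyGetD_eq_getElem s 0 hl (by omega)]
        exact Option.some.inj ha
      · -- rest = take k of the rest
        have hres : (x.take (k+1)).tail = rest := by rw [hsg]; rfl
        rw [← hres, ← List.drop_one, List.drop_take, List.drop_one, hx, List.tail_drop]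
        rw [show (l + 1).toNat = l.toNat + 1 by omega]
        norm_num

lemma pvFT_eq_ilv (nb : Nat) : ∀ (t : List Int), t.length ≤ nb →
    pvFT t = pvIlv ((t.drop (t.length / 2)).reverse) (t.take (t.length / 2)) := by
  induction nb with
  | zero =>
    intro t ht
    have : t = [] := List.length_eq_zero_iff.mp (by omega)
    subst this; simp [pvFT, pvIlv]
  | succ nb ih =>
    intro t ht
    cases t with
    | nil => simp [pvFT, pvIlv]
    | cons a rest =>
      rcases rest.eq_nil_or_concat with hrest | ⟨m, b, hrest⟩
      · subst hrest
        simp [pvFT, pvFF, pvIlv]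
      · rw [List.concat_eq_append] at hrest
        subst hrest
        have hlen : (a :: (m ++ [b])).length = m.length + 2 := by simp
        have hhalf : (a :: (m ++ [b])).length / 2 = m.length / 2 + 1 := by
          rw [hlen]; omega
        have hle : m.length / 2 ≤ m.length := by omega
        -- left side: fT picks b then a, recurses on m
        have hL : pvFT (a :: (m ++ [b])) = b :: a :: pvFT m := by
          rw [pvFT_ne_nil _ (by simp)]
          have h1 : (a :: (m ++ [b])).getLast?.getD 0 = b := by
            rw [show a :: (m ++ [b]) = (a :: m) ++ [b] by simp, List.getLast?_concat]; rfl
          have h2 : (a :: (m ++ [b])).dropLast = a :: m := by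
            rw [show a :: (m ++ [b]) = (a :: m) ++ [b] by simp, List.dropLast_concat]
          rw [h1, h2, pvFF]
        rw [hL, hhalf]
        -- right side: split the slices
        have hdrop : (a :: (m ++ [b])).drop (m.length / 2 + 1)
            = (m.drop (m.length / 2)) ++ [b] := by
          simp [List.drop_append_of_le_length hle]
        have htake : (a :: (m ++ [b])).take (m.length / 2 + 1)
            = a :: m.take (m.length / 2) := by
          simp [List.take_append_of_le_length hle]
        rw [hdrop, htake, List.reverse_append]
        simp only [List.reverse_cons, List.reverse_nil, List.nil_append, List.cons_append]
        rw [show ∀ (u v : List Int), pvIlv (b :: u) (a :: v) = b :: a :: pvIlv u v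
              from fun u v => rfl]
        rw [ih m (by simp at ht; omega)]

lemma pvZip_eq_ilv : ∀ (lo hi : List Int), lo.length ≤ hi.length → hi.length ≤ lo.length + 1 →
    ((hi.zip lo).flatMap (fun p => [p.1, p.2])) ++
      (if lo.length < hi.length then [PySem.List.pyGetD hi (-1) 0] else [])
    = pvIlv hi lo := by
  intro lo
  induction lo with
  | nil =>
    intro hi h1 h2
    cases hi with
    | nil => simp [pvIlv]
    | cons x hs =>
      have hh2 : hs.length + 1 ≤ 0 + 1 := by simpa using h2
      have : hs = [] := List.length_eq_zero_iff.mp (by omega)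
      subst this
      simp [pvIlv, PySem.List.pyGetD_neg_one]
  | cons l ls ih =>
    intro hi h1 h2
    cases hi with
    | nil => simp at h1
    | cons h hs =>
      simp only [List.length_cons] at h1 h2
      have hiff : (l :: ls).length < (h :: hs).length ↔ ls.length < hs.length := by
        simp
      rw [show pvIlv (h :: hs) (l :: ls) = h :: l :: pvIlv hs ls from rfl,
        ← ih hs (by omega) (by omega)]
      simp only [List.zip_cons_cons, List.flatMap_cons, List.cons_append, List.nil_append]
      congr 2
      by_cases hc : ls.length < hs.length
      · have hne : hs ≠ [] := by intro hh; subst hh; simp at hc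
        rw [if_pos (hiff.mpr hc), if_pos hc]
        congr 2
        rw [PySem.List.pyGetD_neg_one _ _ (by simp), PySem.List.pyGetD_neg_one _ _ hne]
        exact List.getLast_cons hne
      · rw [if_neg (fun hh => hc (hiff.mp hh)), if_neg hc]

-- ===== VERDICT (by name: the statement is the Claim_ definition above) =====
theorem interleave_sort_py_spec : Claim_equal_interleave_sort_py := by
  intro arr _
  unfold Spec_interleave_sort_py interleave_sort_py interleave_sort_py_alt
  set s := PySem.List.sorted arr (fun x => x) false with hs
  simp only [PySem.List.len_eq]
  have hfd : PySem.Int.floordiv ((s.length : Nat) : Int) 2 = ((s.length / 2 : Nat) : Int) := by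
    exact_mod_cast PySem.Int.floordiv_natCast s.length 2
  rw [hfd, PySem.List.slice_to_natCast,
    PySem.List.slice_from_natCast, PySem.List.slice?_none_none_neg_one]
  simp only [Option.getD_some]
  have hA : pvALoop s 0 ((s.length : Int) - 1) true = pvFT s := by
    have h := pvALoop_eq s.length s 0 ((s.length : Int) - 1) true (by omega) (by omega) (by omega)
    simpa using h
  rw [hA, pvFT_eq_ilv s.length s le_rfl]
  set hi := (s.drop (s.length / 2)).reverse with hhi
  set lo := s.take (s.length / 2) with hlo
  have hhilen : hi.length = s.length - s.length / 2 := by rw [hhi]; simp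
  have hlolen : lo.length = s.length / 2 := by rw [hlo, List.length_take]; omega
  rw [PySem.List.foldl_append_eq_flatMap]
  simp only [List.nil_append]
  rw [← pvZip_eq_ilv lo hi (by omega) (by omega)]
  have hcond : (((hi.length : Int)) > ((s.length / 2 : Nat) : Int)) ↔ lo.length < hi.length := by
    rw [hlolen]
    constructor <;> intro h <;> exact_mod_cast h
  by_cases hc : lo.length < hi.length
  · rw [if_pos (hcond.mpr hc), if_pos hc]
  · rw [if_neg (fun h => hc (hcond.mp h)), if_neg hc, List.append_nil]
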